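-- pv_equiv track=rewrite | github.com/hcyogeesh/codemind-python | Vowel_Consonant_Seqeuence.py | generate_vowelconsonant_sequence
-- ===== SOURCE A (Python) =====
-- def generate_vowelconsonant_sequence(string):
--     vowels = set(['a', 'e', 'i', 'o', 'u'])
--     result = ""
--     prev_char = ""
--     for char in string:
--         if char in vowels:
--             if prev_char != "V":
--                 result += "V"
--                 prev_char = "V"
--         else:
--             if prev_char != "C":
--                 result += "C"
--                 prev_char = "C"
--     return result.upper()
-- ===== SOURCE B (Python) =====
-- def generate_vowelconsonant_sequence(string):
--     mapped = ['V' if c in ('a', 'e', 'i', 'o', 'u') else 'C' for c in string]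
--     return ''.join(mapped[:1]) + ''.join(b for a, b in zip(mapped, mapped[1:]) if a != b)
-- ===== Notes on version B (the rewrite author's own statement) =====
-- stated objective: simpler
-- what changed: Replaced A's single loop with interleaved prev_char state and conditional string accumulation by a stateless two-phase pipeline: first map every char to its class letter, then keep the first element plus each element that differs from its left neighbour via zip of the mapped list with its shifted self; the trailing upper() call disappears.
import Mathlib
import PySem

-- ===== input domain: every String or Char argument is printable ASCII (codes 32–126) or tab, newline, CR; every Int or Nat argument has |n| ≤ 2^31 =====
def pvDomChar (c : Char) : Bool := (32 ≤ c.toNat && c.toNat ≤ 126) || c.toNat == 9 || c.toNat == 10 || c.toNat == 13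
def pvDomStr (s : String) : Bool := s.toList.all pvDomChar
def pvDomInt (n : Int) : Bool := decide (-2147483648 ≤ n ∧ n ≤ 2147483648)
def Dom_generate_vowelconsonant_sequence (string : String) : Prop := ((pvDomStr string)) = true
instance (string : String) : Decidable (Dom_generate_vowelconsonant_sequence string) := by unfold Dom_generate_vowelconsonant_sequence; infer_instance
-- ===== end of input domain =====

-- B replaces A's interleaved prev_char state machine by a two-phase decomposition (classify every
-- char to its class letter, then drop each element equal to its left neighbour via zip with the
-- shifted list); objective: simpler, same behaviour.

-- ===== PORT A =====
def pvVowels : PySem.Set Char := PySem.Set.ofList ['a', 'e', 'i', 'o', 'u']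

-- A's for-loop: state (result, prev_char); branches in A's order.
def pvLoopA : List Char → List Char → String → List Char
  | [], result, _ => result
  | c :: cs, result, prev =>
    if PySem.Set.contains pvVowels c then
      if prev ≠ "V" then pvLoopA cs (result ++ ['V']) "V" else pvLoopA cs result prev
    else
      if prev ≠ "C" then pvLoopA cs (result ++ ['C']) "C" else pvLoopA cs result prev

def generate_vowelconsonant_sequence (string : String) : String :=
  PySem.Str.upper (String.ofList (pvLoopA string.toList [] ""))

-- ===== PORT B =====
def pvClassify (c : Char) : Char := if c ∈ (['a', 'e', 'i', 'o', 'u'] : List Char) then 'V' else 'C'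

def generate_vowelconsonant_sequence_alt (string : String) : String :=
  let mapped := string.toList.map pvClassify
  String.ofList (mapped.take 1 ++
    (mapped.zip mapped.tail).filterMap (fun p => if p.1 ≠ p.2 then some p.2 else none))

-- ===== PRECONDITION & SPEC =====
def Spec_generate_vowelconsonant_sequence (string : String) (out : String) : Prop := out = generate_vowelconsonant_sequence_alt string
instance (string : String) (out : String) : Decidable (Spec_generate_vowelconsonant_sequence string out) := by unfold Spec_generate_vowelconsonant_sequence; infer_instance

-- ===== CLAIM (what is proved, stated in full; the proofs are below) =====
def Claim_equal_generate_vowelconsonant_sequence : Prop := ∀ (string : String), Dom_generate_vowelconsonant_sequence string → Spec_generate_vowelconsonant_sequence string (generate_vowelconsonant_sequence string)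

-- ===== LEMMAS AND PROOFS =====

-- run-collapse relative to an optional previous class
def pvCollapse : Option Char → List Char → List Char
  | _, [] => []
  | p, x :: xs => if some x = p then pvCollapse p xs else x :: pvCollapse (some x) xs

theorem pvClassify_eq_V (c : Char) :
    (c ∈ pvVowels) ↔ pvClassify c = 'V' := by
  have h : pvVowels = ['a','e','i','o','u'] := by decide
  rw [h]
  by_cases hm : c ∈ (['a','e','i','o','u'] : List Char) <;> simp [pvClassify, hm]

theorem pvLoopA_eq (cs : List Char) :
    ∀ (res : List Char),
      (pvLoopA cs res "" = res ++ pvCollapse none (cs.map pvClassify)) ∧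
      (pvLoopA cs res "V" = res ++ pvCollapse (some 'V') (cs.map pvClassify)) ∧
      (pvLoopA cs res "C" = res ++ pvCollapse (some 'C') (cs.map pvClassify)) := by
  induction cs with
  | nil => intro res; simp [pvLoopA, pvCollapse]
  | cons c cs ih =>
    intro res
    by_cases hv : c ∈ pvVowels
    · have hcl : pvClassify c = 'V' := (pvClassify_eq_V c).1 hv
      refine ⟨?_, ?_, ?_⟩ <;>
        simp [pvLoopA, hv, hcl, pvCollapse, (ih (res ++ ['V'])).2.1, (ih res).2.1]
    · have hcl : pvClassify c = 'C' := by
        by_cases hm : c ∈ (['a','e','i','o','u'] : List Char)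
        · exact absurd ((pvClassify_eq_V c).2 (by simp [pvClassify, hm])) hv
        · simp [pvClassify, hm]
      refine ⟨?_, ?_, ?_⟩ <;>
        simp [pvLoopA, hv, hcl, pvCollapse, (ih (res ++ ['C'])).2.2, (ih res).2.2]

theorem pvCollapse_some (t : List Char) :
    ∀ p : Char, pvCollapse (some p) t =
      ((p :: t).zip t).filterMap (fun q => if q.1 ≠ q.2 then some q.2 else none) := by
  induction t with
  | nil => intro p; simp [pvCollapse]
  | cons x xs ih =>
    intro p
    by_cases h : x = p <;> simp [pvCollapse, h, ih, eq_comm]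

theorem pvCollapse_none (l : List Char) :
    pvCollapse none l = l.take 1 ++
      (l.zip l.tail).filterMap (fun q => if q.1 ≠ q.2 then some q.2 else none) := by
  cases l with
  | nil => simp [pvCollapse]
  | cons h t => simp [pvCollapse, pvCollapse_some]

theorem pvCollapse_mem {l : List Char} {p : Option Char} {x : Char}
    (hx : x ∈ pvCollapse p l) : x ∈ l := by
  induction l generalizing p with
  | nil => simp [pvCollapse] at hx
  | cons c cs ih =>
    simp only [pvCollapse] at hx
    split at hx
    · exact List.mem_cons_of_mem _ (ih hx)
    · rcases List.mem_cons.1 hx with h | h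
      · simp [h]
      · exact List.mem_cons_of_mem _ (ih h)

theorem pvUpper_fix (l : List Char) (hl : ∀ x ∈ l, x = 'V' ∨ x = 'C') :
    PySem.Chars.upper l = l := by
  induction l with
  | nil => rfl
  | cons c cs ih =>
    have hc := hl c (by simp)
    have hcs := ih (fun x hx => hl x (by simp [hx]))
    rcases hc with h | h <;> subst h <;>
      simp [PySem.Chars.upper] at hcs ⊢ <;> exact ⟨by decide, hcs⟩

-- ===== VERDICT (by name: the statement is the Claim_ definition above) =====
theorem generate_vowelconsonant_sequence_spec : Claim_equal_generate_vowelconsonant_sequence := by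
  intro s _
  unfold Spec_generate_vowelconsonant_sequence
  unfold generate_vowelconsonant_sequence generate_vowelconsonant_sequence_alt
  have hloop := (pvLoopA_eq s.toList []).1
  simp only [List.nil_append] at hloop
  rw [hloop]
  have hmem : ∀ x ∈ pvCollapse none (s.toList.map pvClassify), x = 'V' ∨ x = 'C' := by
    intro x hx
    have := pvCollapse_mem hx
    rcases List.mem_map.1 this with ⟨c, _, hc⟩
    by_cases h : c ∈ (['a','e','i','o','u'] : List Char) <;>
      simp [pvClassify, h] at hc <;> [exact Or.inl hc.symm; exact Or.inr hc.symm]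
  apply String.toList_inj.mp
  rw [PySem.Str.toList_upper]
  have hmk : ∀ l : List Char, (String.ofList l).toList = l := fun l => (String.ofList_eq.mp rfl).symm
  rw [hmk, hmk, pvUpper_fix _ hmem, pvCollapse_none]
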